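-- pv_equiv track=rewrite | github.com/MrBrantCode/unitest_baseline | mut_generate/mist_train_taco/taco_12376/solution.py | min_steps_to_form_string
-- ===== SOURCE A (Python) =====
-- def min_steps_to_form_string(S: str) -> int:
--     dp = [100000000] * len(S)
--     dp[0] = 1
--     for i in range(1, len(S)):
--         if i % 2 == 1 and S[:i // 2 + 1] == S[i // 2 + 1:i + 1]:
--             dp[i] = min(1 + dp[i // 2], dp[i])
--         dp[i] = min(dp[i], dp[i - 1] + 1)
--     return dp[len(S) - 1]
-- ===== SOURCE B (Python) =====
-- def min_steps_to_form_string(S: str) -> int: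
--     n = len(S)
--     INF = 100000000
--     # Z-array: z[k] = length of the longest common prefix of S and S[k:]
--     z = [0] * n
--     l = r = 0
--     for k in range(1, n):
--         zk = min(r - k, z[k - l]) if k < r else 0
--         while zk < n - k and S[zk] == S[k + zk]:
--             zk += 1
--         z[k] = zk
--         if k + zk > r:
--             l, r = k, k + zk
--     dp = [1]
--     for i in range(1, n):
--         best = min(dp[i - 1] + 1, INF)
--         if i % 2 == 1 and z[i // 2 + 1] >= i // 2 + 1:
--             best = min(best, dp[i // 2] + 1)
--         dp.append(best)
--     return dp[n - 1]
-- ===== Notes on version B (the rewrite author's own statement) =====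
-- stated objective: faster
-- what changed: B computes the Z-array (longest common prefix of S with each suffix) once with the linear-time Z-algorithm and the growing-list DP tests the half-equality as z[h] >= h, instead of A's O(i) slice comparison at every odd index.
-- outside the precondition, e.g. on min_steps_to_form_string(''): A raises IndexError, B returns 1
import Mathlib
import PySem

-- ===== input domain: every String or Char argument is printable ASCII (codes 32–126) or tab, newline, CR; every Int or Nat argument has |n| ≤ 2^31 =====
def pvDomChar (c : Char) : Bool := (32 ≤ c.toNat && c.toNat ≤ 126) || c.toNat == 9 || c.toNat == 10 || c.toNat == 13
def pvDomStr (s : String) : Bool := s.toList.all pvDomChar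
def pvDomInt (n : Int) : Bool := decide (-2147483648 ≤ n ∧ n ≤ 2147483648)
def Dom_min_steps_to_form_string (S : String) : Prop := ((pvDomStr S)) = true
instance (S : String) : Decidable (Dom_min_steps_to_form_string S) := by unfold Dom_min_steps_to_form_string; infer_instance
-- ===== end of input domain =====

-- B replaces A's per-index slice comparison by a Z-array (longest common prefix of S with
-- each of its suffixes, computed by the classic linear-time Z-algorithm); the DP then tests
-- the half-equality as z[h] >= h.

-- ===== PORT A =====
-- A's for-loop over i in range(1, len(S)), as a fuel recursion (fuel = remaining iterations).
-- S[:i//2+1] is s.take (i/2+1) and S[i//2+1:i+1] is (s.drop (i/2+1)).take (i+1-(i/2+1)):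
-- exact for these nonnegative bounds by PySem.List.slice_natCast; dp indices are in range,
-- so dp[j] is dp.getD j 0.
def aGo (s : List Char) (dp : List Int) (i fuel : Nat) : List Int :=
  match fuel with
  | 0 => dp
  | f + 1 =>
    let dp1 :=
      if i % 2 = 1 ∧ s.take (i / 2 + 1) = (s.drop (i / 2 + 1)).take (i + 1 - (i / 2 + 1)) then
        dp.set i (min (1 + dp.getD (i / 2) 0) (dp.getD i 0))
      else dp
    aGo s (dp1.set i (min (dp1.getD i 0) (dp1.getD (i - 1) 0 + 1))) (i + 1) f

def min_steps_to_form_string (S : String) : Int :=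
  let s := S.toList
  let n := s.length
  let dp := (List.replicate n (100000000 : Int)).set 0 1
  (aGo s dp 1 (n - 1)).getD (n - 1) 0

-- ===== PORT B =====
-- B's inner while loop extending zk while zk < n - k and S[zk] == S[k + zk];
-- fuel = n bounds its iterations (zk grows to at most n - k)
def lcpGo (s : List Char) (n k m fuel : Nat) : Nat :=
  match fuel with
  | 0 => m
  | f + 1 =>
    if m < n - k ∧ s.getD m ' ' = s.getD (k + m) ' ' then lcpGo s n k (m + 1) f else m

-- B's Z-algorithm for-loop over k in range(1, n) with state (z, l, r), as a fuel recursion;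
-- the in-place cell z[k] that the while loop increments is the local zk, stored back by set
def zGo (s : List Char) (n : Nat) (z : List Nat) (l r k fuel : Nat) : List Nat :=
  match fuel with
  | 0 => z
  | f + 1 =>
    let zk0 := if k < r then min (r - k) (z.getD (k - l) 0) else 0
    let zk := lcpGo s n k zk0 n
    let z' := z.set k zk
    if r < k + zk then zGo s n z' k (k + zk) (k + 1) f
    else zGo s n z' l r (k + 1) f

-- B's dp for-loop appending to dp, as a fuel recursion
def bGo (z : List Nat) (dp : List Int) (i fuel : Nat) : List Int :=
  match fuel with
  | 0 => dp
  | f + 1 =>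
    let best := min (dp.getD (i - 1) 0 + 1) 100000000
    let best :=
      if i % 2 = 1 ∧ i / 2 + 1 ≤ z.getD (i / 2 + 1) 0 then
        min best (dp.getD (i / 2) 0 + 1)
      else best
    bGo z (dp ++ [best]) (i + 1) f

def min_steps_to_form_string_alt (S : String) : Int :=
  let s := S.toList
  let n := s.length
  let z := zGo s n (List.replicate n 0) 0 0 1 (n - 1)
  (bGo z [1] 1 (n - 1)).getD (n - 1) 0

-- ===== PRECONDITION & SPEC =====
-- Pre_ excludes only the empty string, on which A raises IndexError (dp[0] = 1 on an empty list).
def Pre_min_steps_to_form_string (S : String) : Prop := S.toList ≠ []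
instance (S : String) : Decidable (Pre_min_steps_to_form_string S) := by
  unfold Pre_min_steps_to_form_string; infer_instance

def pvWitness_min_steps_to_form_string : String := "abab"

def Spec_min_steps_to_form_string (S : String) (out : Int) : Prop := out = min_steps_to_form_string_alt S
instance (S : String) (out : Int) : Decidable (Spec_min_steps_to_form_string S out) := by unfold Spec_min_steps_to_form_string; infer_instance

-- ===== CLAIM (what is proved, stated in full; the proofs are below) =====
def Claim_equal_min_steps_to_form_string : Prop := ∀ (S : String), Dom_min_steps_to_form_string S → Pre_min_steps_to_form_string S → Spec_min_steps_to_form_string S (min_steps_to_form_string S)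

-- ===== LEMMAS AND PROOFS =====

-- reference longest-common-prefix function
def lcp : List Char → List Char → Nat
  | a :: as, b :: bs => if a = b then lcp as bs + 1 else 0
  | _, _ => 0

theorem lcp_ge_iff (h : Nat) (a b : List Char) :
    h ≤ lcp a b ↔ h ≤ a.length ∧ h ≤ b.length ∧ a.take h = b.take h := by
  induction h generalizing a b with
  | zero => simp
  | succ h ih =>
    cases a with
    | nil => simp [lcp]
    | cons x as =>
      cases b with
      | nil => simp [lcp]
      | cons y bs =>
        by_cases hxy : x = y
        · subst hxy
          simp [lcp, ih]
        · simp [lcp, hxy]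

theorem lcp_le_right (a b : List Char) : lcp a b ≤ b.length := by
  induction a generalizing b with
  | nil => simp [lcp]
  | cons x as ih =>
    cases b with
    | nil => simp [lcp]
    | cons y bs =>
      by_cases hxy : x = y
      · simpa [lcp, hxy] using ih bs
      · simp [lcp, hxy]

theorem lcp_add_drop (m : Nat) (a b : List Char) (hm : m ≤ lcp a b) :
    lcp a b = m + lcp (a.drop m) (b.drop m) := by
  induction m generalizing a b with
  | zero => simp
  | succ m ih =>
    cases a with
    | nil => simp [lcp] at hm
    | cons x as =>
      cases b with
      | nil => simp [lcp] at hm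
      | cons y bs =>
        by_cases hxy : x = y
        · have hm' : m ≤ lcp as bs := by
            have := hm; simp [lcp, hxy] at this; omega
          have := ih as bs hm'
          simp [lcp, hxy]
          omega
        · simp [lcp, hxy] at hm

theorem lcpGo_eq_lcp (s : List Char) (k : Nat) :
    ∀ fuel m, k + m ≤ s.length → s.length - (k + m) ≤ fuel →
      lcpGo s s.length k m fuel = m + lcp (s.drop m) (s.drop (k + m)) := by
  intro fuel
  induction fuel with
  | zero =>
    intro m h1 h2
    have hk : k + m = s.length := by omega
    have : s.drop (k + m) = [] := by rw [hk]; simp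
    rw [this]
    cases s.drop m <;> simp [lcpGo, lcp]
  | succ f ih =>
    intro m h1 h2
    by_cases hm : m < s.length - k
    · have hmn : m < s.length := by omega
      have hkm : k + m < s.length := by omega
      have hgd1 : s.getD m ' ' = s[m] := by
        simp [List.getD_eq_getElem?_getD, List.getElem?_eq_getElem hmn]
      have hgd2 : s.getD (k + m) ' ' = s[k + m] := by
        simp [List.getD_eq_getElem?_getD, List.getElem?_eq_getElem hkm]
      have hd1 : s.drop m = s[m] :: s.drop (m + 1) := List.drop_eq_getElem_cons hmn
      have hd2 : s.drop (k + m) = s[k + m] :: s.drop (k + m + 1) := List.drop_eq_getElem_cons hkm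
      by_cases heq : s[m] = s[k + m]
      · have hstep : lcpGo s s.length k m (f + 1) = lcpGo s s.length k (m + 1) f := by
          simp only [lcpGo]
          rw [if_pos ⟨hm, by rw [hgd1, hgd2]; exact heq⟩]
        rw [hstep, ih (m + 1) (by omega) (by omega), hd1, hd2]
        have h3 : k + (m + 1) = k + m + 1 := by omega
        simp [lcp, heq, h3]
        omega
      · have hstep : lcpGo s s.length k m (f + 1) = m := by
          simp only [lcpGo]
          rw [if_neg (fun hc => heq (by rw [← hgd1, ← hgd2]; exact hc.2))]
        rw [hstep, hd1, hd2]
        simp [lcp, heq]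
    · have hk : k + m = s.length := by omega
      have hnil : s.drop (k + m) = [] := by rw [hk]; simp
      have hstep : lcpGo s s.length k m (f + 1) = m := by
        simp only [lcpGo]
        rw [if_neg (fun hc => hm hc.1)]
      rw [hstep, hnil]
      cases s.drop m <;> simp [lcp]

-- starting the while loop at a valid already-matched offset m still yields the exact lcp
theorem lcpGo_exact (s : List Char) (k m : Nat) (hk : k ≤ s.length)
    (hm : m ≤ lcp s (s.drop k)) :
    lcpGo s s.length k m s.length = lcp s (s.drop k) := by
  have hlen : lcp s (s.drop k) ≤ s.length - k := by
    have := lcp_le_right s (s.drop k)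
    simpa using this
  have h1 : k + m ≤ s.length := by omega
  have hd : (s.drop k).drop m = s.drop (k + m) := by
    rw [List.drop_drop]
  rw [lcpGo_eq_lcp s k s.length m h1 (by omega), lcp_add_drop m s (s.drop k) hm, hd]

-- pointwise consequence of a matched window: positions k..k+m-1 can be shifted left by l
theorem take_drop_shift (s : List Char) (l r k m : Nat)
    (hwin : (s.drop l).take (r - l) = s.take (r - l))
    (h1 : l ≤ k) (h2 : k + m ≤ r) (_hr : r ≤ s.length) :
    (s.drop k).take m = (s.drop (k - l)).take m := by
  have hpt : ∀ t, t < r - l → s[l + t]? = s[t]? := by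
    intro t ht
    have h := congrArg (fun u => u[t]?) hwin
    simpa [List.getElem?_take, ht, List.getElem?_drop] using h
  apply List.ext_getElem?
  intro j
  by_cases hj : j < m
  · have hb : k - l + j < r - l := by omega
    have := hpt (k - l + j) hb
    have harith : l + (k - l + j) = k + j := by omega
    rw [harith] at this
    simp [hj, List.getElem?_drop, this]
  · simp [hj]

-- the Z-box hint never overshoots the true lcp
theorem hint_le (s : List Char) (l r k : Nat) (zkl : Nat)
    (hwin : (s.drop l).take (r - l) = s.take (r - l))
    (hl1 : 1 ≤ l) (hlk : l < k) (hkr : k < r) (hr : r ≤ s.length)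
    (hzl : zkl = lcp s (s.drop (k - l))) :
    min (r - k) zkl ≤ lcp s (s.drop k) := by
  set m := min (r - k) zkl with hm
  rw [lcp_ge_iff]
  refine ⟨by omega, by simp; omega, ?_⟩
  have hshift : (s.drop k).take m = (s.drop (k - l)).take m :=
    take_drop_shift s l r k m hwin (by omega) (by omega) hr
  have hzk : m ≤ lcp s (s.drop (k - l)) := by omega
  have htake : s.take m = (s.drop (k - l)).take m := ((lcp_ge_iff m _ _).mp hzk).2.2
  rw [htake, hshift]

-- getD/set bookkeeping
theorem getD_append_left {α : Type} (l r : List α) (j : Nat) (d : α) (hj : j < l.length) :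
    (l ++ r).getD j d = l.getD j d := by
  simp [List.getD_eq_getElem?_getD, List.getElem?_append_left hj]

theorem getD_append_cons_self {α : Type} (l : List α) (v : α) (r : List α) (d : α) :
    (l ++ v :: r).getD l.length d = v := by
  simp [List.getD_eq_getElem?_getD]

theorem set_append_cons_self {α : Type} (l : List α) (v : α) (r : List α) (w : α) :
    (l ++ v :: r).set l.length w = l ++ w :: r := by
  rw [List.set_append_right _ _ (Nat.le_refl _)]
  simp

theorem getD_set_self {α : Type} (z : List α) (k : Nat) (v : α) (d : α) (hk : k < z.length) :
    (z.set k v).getD k d = v := by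
  simp [List.getD_eq_getElem?_getD, hk]

theorem getD_set_ne {α : Type} (z : List α) (k j : Nat) (v : α) (d : α) (hj : j ≠ k) :
    (z.set k v).getD j d = z.getD j d := by
  simp [List.getD_eq_getElem?_getD, List.getElem?_set_ne (fun h => hj h.symm)]

-- the Z-algorithm loop computes the exact lcp table
theorem zGo_spec (s : List Char) :
    ∀ fuel k z l r, 1 ≤ k → k + fuel = s.length → z.length = s.length →
      (∀ j, 1 ≤ j → j < k → z.getD j 0 = lcp s (s.drop j)) →
      (r ≤ k ∨ (1 ≤ l ∧ l < k ∧ l < r ∧ r ≤ s.length ∧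
        (s.drop l).take (r - l) = s.take (r - l))) →
      ∀ j, 1 ≤ j → j < s.length →
        (zGo s s.length z l r k fuel).getD j 0 = lcp s (s.drop j) := by
  intro fuel
  induction fuel with
  | zero =>
    intro k z l r hk1 hkf hzlen hz hwin j hj1 hj2
    simp only [zGo]
    exact hz j hj1 (by omega)
  | succ f ih =>
    intro k z l r hk1 hkf hzlen hz hwin j hj1 hj2
    have hkn : k < s.length := by omega
    -- the hint is a valid matched start
    have hhint : (if k < r then min (r - k) (z.getD (k - l) 0) else 0) ≤ lcp s (s.drop k) := by
      by_cases hkr : k < r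
      · rcases hwin with h | ⟨hl1, hlk, hlr, hrn, hw⟩
        · omega
        · simp only [if_pos hkr]
          exact hint_le s l r k (z.getD (k - l) 0) hw hl1 hlk hkr hrn
            (hz (k - l) (by omega) (by omega))
      · simp [hkr]
    have hzk : lcpGo s s.length k (if k < r then min (r - k) (z.getD (k - l) 0) else 0)
        s.length = lcp s (s.drop k) :=
      lcpGo_exact s k _ (by omega) hhint
    have hzk_le : lcp s (s.drop k) ≤ s.length - k := by
      have := lcp_le_right s (s.drop k)
      simpa using this
    -- the updated table
    have hzlen' : (z.set k (lcp s (s.drop k))).length = s.length := by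
      simp [hzlen]
    have hz' : ∀ j, 1 ≤ j → j < k + 1 →
        (z.set k (lcp s (s.drop k))).getD j 0 = lcp s (s.drop j) := by
      intro j hj1' hj2'
      by_cases hjk : j = k
      · subst hjk
        exact getD_set_self z j _ 0 (by omega)
      · rw [getD_set_ne z k j _ 0 hjk]
        exact hz j hj1' (by omega)
    have hstep : zGo s s.length z l r k (f + 1)
        = if r < k + lcp s (s.drop k) then
            zGo s s.length (z.set k (lcp s (s.drop k))) k (k + lcp s (s.drop k)) (k + 1) f
          else zGo s s.length (z.set k (lcp s (s.drop k))) l r (k + 1) f := by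
      simp only [zGo, hzk]
    rw [hstep]
    by_cases hnew : r < k + lcp s (s.drop k)
    · rw [if_pos hnew]
      refine ih (k + 1) _ k (k + lcp s (s.drop k)) (by omega) (by omega) hzlen' hz' ?_ j hj1 hj2
      by_cases h0 : lcp s (s.drop k) = 0
      · left; omega
      · right
        refine ⟨by omega, by omega, by omega, by omega, ?_⟩
        have harith : k + lcp s (s.drop k) - k = lcp s (s.drop k) := by omega
        rw [harith]
        exact (((lcp_ge_iff (lcp s (s.drop k)) s (s.drop k)).mp (Nat.le_refl _)).2.2).symm
    · rw [if_neg hnew]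
      refine ih (k + 1) _ l r (by omega) (by omega) hzlen' hz' ?_ j hj1 hj2
      rcases hwin with h | ⟨hl1, hlk, hlr, hrn, hw⟩
      · left; omega
      · right; exact ⟨hl1, by omega, hlr, hrn, hw⟩

-- the condition A tests is the condition B tests
theorem cond_equiv (s : List Char) (z : List Nat)
    (hz : ∀ j, 1 ≤ j → j < s.length → z.getD j 0 = lcp s (s.drop j))
    (i : Nat) (hodd : i % 2 = 1) (hi : i < s.length) :
    (s.take (i / 2 + 1) = (s.drop (i / 2 + 1)).take (i + 1 - (i / 2 + 1)))
      ↔ i / 2 + 1 ≤ z.getD (i / 2 + 1) 0 := by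
  set h := i / 2 + 1 with hh
  have h2 : 2 * h = i + 1 := by omega
  have hlen : h < s.length := by omega
  rw [hz h (by omega) hlen, lcp_ge_iff]
  have htk : i + 1 - h = h := by omega
  constructor
  · intro heq
    rw [htk] at heq
    exact ⟨by omega, by simp; omega, heq⟩
  · rintro ⟨-, -, heq⟩
    rw [htk]
    exact heq

-- the two dp loops compute the same dp list
theorem loop_eq (s : List Char) (z : List Nat)
    (hz : ∀ j, 1 ≤ j → j < s.length → z.getD j 0 = lcp s (s.drop j)) :
    ∀ fuel i (dpB : List Int), 1 ≤ i → i + fuel = s.length → dpB.length = i →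
      aGo s (dpB ++ List.replicate (s.length - i) 100000000) i fuel
        = bGo z dpB i fuel := by
  intro fuel
  induction fuel with
  | zero =>
    intro i dpB h1 h2 h3
    have h0 : s.length - i = 0 := by omega
    simp [aGo, bGo, h0]
  | succ f ih =>
    intro i dpB h1 h2 h3
    have hi : i < s.length := by omega
    set m := s.length - (i + 1) with hm
    have hrep : List.replicate (s.length - i) (100000000 : Int)
        = 100000000 :: List.replicate m 100000000 := by
      have : s.length - i = m + 1 := by omega
      rw [this, List.replicate_succ]
    set a := dpB.getD (i / 2) 0 with ha
    set b := dpB.getD (i - 1) 0 with hb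
    have hread_half : (dpB ++ (100000000 : Int) :: List.replicate m 100000000).getD (i / 2) 0 = a :=
      by rw [ha]; exact getD_append_left _ _ _ _ (by omega)
    have hread_prev : (dpB ++ (100000000 : Int) :: List.replicate m 100000000).getD (i - 1) 0 = b :=
      by rw [hb]; exact getD_append_left _ _ _ _ (by omega)
    have hread_self : (dpB ++ (100000000 : Int) :: List.replicate m 100000000).getD i 0 = 100000000 :=
      by rw [← h3]; exact getD_append_cons_self _ _ _ _
    by_cases hcond : i % 2 = 1 ∧ s.take (i / 2 + 1) = (s.drop (i / 2 + 1)).take (i + 1 - (i / 2 + 1))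
    · have hcondB : i % 2 = 1 ∧ i / 2 + 1 ≤ z.getD (i / 2 + 1) 0 :=
        ⟨hcond.1, (cond_equiv s z hz i hcond.1 hi).mp hcond.2⟩
      have hstepA :
          aGo s (dpB ++ List.replicate (s.length - i) 100000000) i (f + 1)
            = aGo s ((dpB ++ [min (min (1 + a) 100000000) (b + 1)])
                ++ List.replicate m 100000000) (i + 1) f := by
        rw [hrep]
        simp only [aGo]
        rw [if_pos hcond, hread_half, hread_self]
        have hset1 : (dpB ++ (100000000 : Int) :: List.replicate m 100000000).set i
            (min (1 + a) 100000000)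
            = dpB ++ (min (1 + a) 100000000) :: List.replicate m 100000000 := by
          rw [← h3]; exact set_append_cons_self _ _ _ _
        rw [hset1]
        have hget1 : (dpB ++ (min (1 + a) 100000000) :: List.replicate m 100000000).getD i 0
            = min (1 + a) 100000000 := by
          rw [← h3]; exact getD_append_cons_self _ _ _ _
        have hget2 : (dpB ++ (min (1 + a) 100000000) :: List.replicate m 100000000).getD (i - 1) 0
            = b := by
          rw [hb]; exact getD_append_left _ _ _ _ (by omega)
        rw [hget1, hget2]
        have hset2 : (dpB ++ (min (1 + a) 100000000) :: List.replicate m 100000000).set i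
            (min (min (1 + a) 100000000) (b + 1))
            = dpB ++ (min (min (1 + a) 100000000) (b + 1)) :: List.replicate m 100000000 := by
          rw [← h3]; exact set_append_cons_self _ _ _ _
        rw [hset2]
        simp
      have hstepB :
          bGo z dpB i (f + 1)
            = bGo z (dpB ++ [min (min (b + 1) 100000000) (a + 1)]) (i + 1) f := by
        simp only [bGo]
        rw [if_pos hcondB, ← hb, ← ha]
      rw [hstepA, hstepB]
      have hv : min (min (1 + a) 100000000) (b + 1) = min (min (b + 1) 100000000) (a + 1) := by
        omega
      rw [hv]
      exact ih (i + 1) _ (by omega) (by omega) (by simp [h3])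
    · have hcondB : ¬(i % 2 = 1 ∧ i / 2 + 1 ≤ z.getD (i / 2 + 1) 0) := by
        intro hc
        exact hcond ⟨hc.1, (cond_equiv s z hz i hc.1 hi).mpr hc.2⟩
      have hstepA :
          aGo s (dpB ++ List.replicate (s.length - i) 100000000) i (f + 1)
            = aGo s ((dpB ++ [min (100000000 : Int) (b + 1)])
                ++ List.replicate m 100000000) (i + 1) f := by
        rw [hrep]
        simp only [aGo]
        rw [if_neg hcond, hread_self, hread_prev]
        have hset1 : (dpB ++ (100000000 : Int) :: List.replicate m 100000000).set i
            (min 100000000 (b + 1))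
            = dpB ++ (min (100000000 : Int) (b + 1)) :: List.replicate m 100000000 := by
          rw [← h3]; exact set_append_cons_self _ _ _ _
        rw [hset1]
        simp
      have hstepB :
          bGo z dpB i (f + 1)
            = bGo z (dpB ++ [min (b + 1) 100000000]) (i + 1) f := by
        simp only [bGo]
        rw [if_neg hcondB, ← hb]
      rw [hstepA, hstepB]
      have hv : min (100000000 : Int) (b + 1) = min (b + 1) 100000000 := by omega
      rw [hv]
      exact ih (i + 1) _ (by omega) (by omega) (by simp [h3])

-- ===== VERDICT (by name: the statement is the Claim_ definition above) =====
theorem min_steps_to_form_string_spec : Claim_equal_min_steps_to_form_string := by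
  intro S _ hpre
  unfold Spec_min_steps_to_form_string min_steps_to_form_string min_steps_to_form_string_alt
  set s := S.toList with hs
  have hne : s ≠ [] := hpre
  have hn : 1 ≤ s.length := List.length_pos_of_ne_nil hne
  have hz : ∀ j, 1 ≤ j → j < s.length →
      (zGo s s.length (List.replicate s.length 0) 0 0 1 (s.length - 1)).getD j 0
        = lcp s (s.drop j) := by
    refine zGo_spec s (s.length - 1) 1 (List.replicate s.length 0) 0 0 (by omega) (by omega)
      (by simp) (by omega) (by omega)
  have hinit : (List.replicate s.length (100000000 : Int)).set 0 1
      = [1] ++ List.replicate (s.length - 1) 100000000 := by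
    have : s.length = (s.length - 1) + 1 := by omega
    rw [this, List.replicate_succ]
    simp
  simp only [hinit]
  rw [loop_eq s _ hz (s.length - 1) 1 [1] (by omega) (by omega) (by simp)]
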